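-- pv_equiv track=rewrite | github.com/albutz/aoc-2022 | src/day_11.py | fmt_puzzle_input
-- ===== SOURCE A (Python) =====
-- def fmt_puzzle_input(notes: list[str]) -> list:
--     """Formatting.
--
--     Split puzzle input to lists of monkeys.
--
--     Args:
--         notes: Raw puzzle input.
--
--     Returns:
--         list: List of notes for each monkey.
--     """
--     split_points = [i for i, val in enumerate(notes) if val == ""]
--     split_points.insert(0, -1)
--     split_points.append(len(notes))
--
--     monkey_list = [
--         notes[(split_points[i] + 2) : split_points[i + 1]]
--         for i in range(len(split_points) - 1)
--     ]
--
--     return monkey_list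
-- ===== SOURCE B (Python) =====
-- def fmt_puzzle_input(notes: list[str]) -> list:
--     """Formatting.
--
--     Split puzzle input to lists of monkeys (single pass with a buffer).
--     """
--     result = []
--     current = []
--     for val in notes:
--         if val == "":
--             result.append(current[1:])
--             current = []
--         else:
--             current.append(val)
--     result.append(current[1:])
--     return result
-- ===== Notes on version B (the rewrite author's own statement) =====
-- stated objective: simpler
-- what changed: Replaced the collect-delimiter-indices-then-slice-between-pairs approach with a single pass that accumulates lines in a buffer and flushes buffer[1:] at each blank line and at the end.
import Mathlib
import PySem

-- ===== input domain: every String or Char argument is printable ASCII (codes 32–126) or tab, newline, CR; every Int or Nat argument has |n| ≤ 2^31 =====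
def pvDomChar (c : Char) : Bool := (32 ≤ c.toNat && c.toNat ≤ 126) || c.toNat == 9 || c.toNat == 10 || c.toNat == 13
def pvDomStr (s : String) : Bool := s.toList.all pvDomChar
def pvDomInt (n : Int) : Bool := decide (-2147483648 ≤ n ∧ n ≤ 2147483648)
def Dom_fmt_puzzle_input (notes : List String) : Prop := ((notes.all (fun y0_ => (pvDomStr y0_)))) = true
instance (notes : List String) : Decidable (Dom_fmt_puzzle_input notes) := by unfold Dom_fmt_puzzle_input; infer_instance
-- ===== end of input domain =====

-- B replaces A's delimiter-index/slice-pairs scheme by one buffered pass; objective: simpler.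

-- ===== PORT A =====
-- split_points = [i for i, val in enumerate(notes) if val == ""]; then insert(0,-1), append(len);
-- monkey_list = [notes[split_points[i]+2 : split_points[i+1]] for i in range(len(split_points)-1)]
-- (the list indexing split_points[i] is always in range here; pyGetD's default 0 is never used)
def fmt_puzzle_input (notes : List String) : List (List String) :=
  let split_points0 : List Int :=
    ((PySem.List.enumerate notes 0).filter (fun p => p.2 == "")).map (fun p => p.1)
  let split_points : List Int := (-1 : Int) :: split_points0 ++ [(notes.length : Int)]
  (PySem.List.pyRange 0 ((split_points.length : Int) - 1) 1).map (fun i =>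
    PySem.List.slice notes (some (PySem.List.pyGetD split_points i 0 + 2))
      (some (PySem.List.pyGetD split_points (i + 1) 0)))

-- ===== PORT B =====
-- the loop of Source B: state (current, result); current[1:] is List.drop 1
def fmtAltGo : List String → List String → List (List String) → List (List String)
  | [], cur, res => res ++ [cur.drop 1]
  | v :: rest, cur, res =>
      if v = "" then fmtAltGo rest [] (res ++ [cur.drop 1])
      else fmtAltGo rest (cur ++ [v]) res

def fmt_puzzle_input_alt (notes : List String) : List (List String) :=
  fmtAltGo notes [] []

-- ===== PRECONDITION & SPEC =====
def Spec_fmt_puzzle_input (notes : List String) (out : List (List String)) : Prop := out = fmt_puzzle_input_alt notes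
instance (notes : List String) (out : List (List String)) : Decidable (Spec_fmt_puzzle_input notes out) := by unfold Spec_fmt_puzzle_input; infer_instance

-- ===== CLAIM (what is proved, stated in full; the proofs are below) =====
def Claim_equal_fmt_puzzle_input : Prop := ∀ (notes : List String), Dom_fmt_puzzle_input notes → Spec_fmt_puzzle_input notes (fmt_puzzle_input notes)

-- ===== LEMMAS AND PROOFS =====

-- indices (as Int) of the "" lines
def spIdx : List String → List Int
  | [] => []
  | x :: t => (if x = "" then [(0 : Int)] else []) ++ (spIdx t).map (· + 1)

-- groups between "" lines (always nonempty)
def gsp : List String → List (List String)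
  | [] => [[]]
  | x :: t => if x = "" then [] :: gsp t else (x :: (gsp t).headI) :: (gsp t).tail

-- consecutive-pair slicing: A's comprehension as a recursion
def pairsMap (notes : List String) : List Int → List (List String)
  | p :: q :: rest => PySem.List.slice notes (some (p + 2)) (some q) :: pairsMap notes (q :: rest)
  | _ => []

theorem gsp_ne_nil (t : List String) : gsp t ≠ [] := by
  cases t with
  | nil => simp [gsp]
  | cons x s => by_cases h : x = "" <;> simp [gsp, h]

theorem gsp_cons_headI_tail (t : List String) : (gsp t).headI :: (gsp t).tail = gsp t := by
  cases hg : gsp t with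
  | nil => exact absurd hg (gsp_ne_nil t)
  | cons a l => simp

theorem map_drop1_gsp (t : List String) :
    (gsp t).map (List.drop 1) = ((gsp t).headI.drop 1) :: ((gsp t).tail.map (List.drop 1)) := by
  conv_lhs => rw [← gsp_cons_headI_tail t]
  rw [List.map_cons]

theorem spIdx_nonneg (t : List String) : ∀ a ∈ spIdx t, 0 ≤ a := by
  induction t with
  | nil => simp [spIdx]
  | cons x s ih =>
    intro a ha
    simp only [spIdx, List.mem_append, List.mem_map] at ha
    rcases ha with ha | ⟨b, hb, rfl⟩
    · split at ha <;> simp_all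
    · have := ih b hb; omega

-- the port's split-point comprehension equals spIdx (generalized over the enumerate start)
theorem enum_filter_eq_spIdx (xs : List String) (s : Int) :
    ((PySem.List.enumerate xs s).filter (fun p => p.2 == "")).map (fun p => p.1)
      = (spIdx xs).map (· + s) := by
  induction xs generalizing s with
  | nil => simp [PySem.List.enumerate_nil, spIdx]
  | cons x t ih =>
    by_cases h : x = ""
    · simp only [PySem.List.enumerate_cons, spIdx, h, List.filter_cons]
      simp [List.map_map]
      rw [ih (s + 1)]
      apply List.map_congr_left; intro a _; simp; ring
    · simp only [PySem.List.enumerate_cons, spIdx, h, List.filter_cons]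
      rw [if_neg (by simpa using h)]
      simp [List.map_map]
      rw [ih (s + 1)]
      apply List.map_congr_left; intro a _; simp; ring

-- index-comprehension over consecutive pairs = pairsMap (Nat-range form)
theorem range_pairs_eq_pairsMap (notes : List String) (l : List Int) :
    (List.range (l.length - 1)).map (fun k =>
        PySem.List.slice notes (some (l.getD k 0 + 2)) (some (l.getD (k + 1) 0)))
      = pairsMap notes l := by
  induction l with
  | nil => simp [pairsMap]
  | cons p tl ih =>
    cases tl with
    | nil => simp [pairsMap]
    | cons q rest =>
      have hlen : (p :: q :: rest : List Int).length - 1 = (q :: rest : List Int).length - 1 + 1 := by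
        simp
      rw [hlen, List.range_succ_eq_map, List.map_cons, List.map_map]
      have ihq := ih
      simp only [List.length_cons, Nat.add_sub_cancel] at ihq ⊢
      refine congrArg₂ _ rfl ?_
      rw [← ihq]
      apply List.map_congr_left
      intro k _
      simp [List.getD]

-- dropping the head shifts every index by one
theorem slice_cons_succ (x : String) (xs : List String) (a b : Int) (ha : 0 ≤ a) (hb : 0 ≤ b) :
    PySem.List.slice (x :: xs) (some (a + 1)) (some (b + 1)) = PySem.List.slice xs (some a) (some b) := by
  rw [PySem.List.slice_toNat _ (by omega) (by omega), PySem.List.slice_toNat _ ha hb]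
  have h2 : (b + 1).toNat - (a + 1).toNat = b.toNat - a.toNat := by omega
  have h1 : (a + 1).toNat = a.toNat + 1 := by omega
  rw [h2, h1, List.drop_succ_cons]

theorem pairsMap_shift (x : String) (xs : List String) :
    ∀ (l : List Int) (p : Int), -1 ≤ p → (∀ a ∈ l, 0 ≤ a) →
      pairsMap (x :: xs) ((p + 1) :: l.map (· + 1)) = pairsMap xs (p :: l) := by
  intro l
  induction l with
  | nil => intro p _ _; simp [pairsMap]
  | cons q rest ih =>
    intro p hp hl
    have hq : 0 ≤ q := hl q (by simp)
    simp only [List.map_cons, pairsMap]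
    rw [show p + 1 + 2 = (p + 2) + 1 by ring, slice_cons_succ x xs (p + 2) q (by omega) hq]
    rw [ih q (by omega) (fun a ha => hl a (by simp [ha]))]

-- the first slice (from index 0 up to the first "" index, or the length) is the first group
theorem slice_first_group (t : List String) :
    PySem.List.slice t (some 0) (some ((spIdx t ++ [(t.length : Int)]).headI))
      = (gsp t).headI := by
  induction t with
  | nil => simp [spIdx, gsp, PySem.List.slice_to]
  | cons y s ih =>
    by_cases h : y = ""
    · simp [spIdx, gsp, h, PySem.List.slice_to]
    · have hne : spIdx s ++ [(s.length : Int)] ≠ [] := by simp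
      have hhead : ((spIdx (y :: s) ++ [((y :: s).length : Int)]).headI)
          = (spIdx s ++ [(s.length : Int)]).headI + 1 := by
        simp only [spIdx, h, List.length_cons]
        push_cast
        simp only [List.nil_append]
        rw [show ((spIdx s).map (· + 1)) ++ [(s.length : Int) + 1]
              = (spIdx s ++ [(s.length : Int)]).map (· + 1) by simp]
        cases hc : spIdx s ++ [(s.length : Int)] with
        | nil => exact absurd hc hne
        | cons a l => simp
      have hq : 0 ≤ (spIdx s ++ [(s.length : Int)]).headI := by
        cases hc : spIdx s with
        | nil => simp
        | cons a l =>
          have := spIdx_nonneg s a (by simp [hc])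
          simp [this]
      rw [hhead]
      rw [PySem.List.slice_toNat _ (by omega) (by omega)]
      simp only [Int.toNat_zero, List.drop_zero, Nat.sub_zero]
      rw [show ((spIdx s ++ [(s.length : Int)]).headI + 1).toNat
            = (spIdx s ++ [(s.length : Int)]).headI.toNat + 1 from by omega,
          List.take_succ_cons]
      rw [PySem.List.slice_toNat _ le_rfl hq] at ih
      simp only [Int.toNat_zero, List.drop_zero, Nat.sub_zero] at ih
      simp [gsp, h, ih]

-- A's pairsMap over the full split-point list is the groups with their heads dropped
theorem pairsMap_full (notes : List String) :
    pairsMap notes ((-1 : Int) :: spIdx notes ++ [(notes.length : Int)])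
      = (gsp notes).map (List.drop 1) := by
  induction notes with
  | nil => decide
  | cons x t ih =>
    by_cases h : x = ""
    · -- split_points = -1 :: 0 :: (shifted); first slice is notes[1:0] = []
      have hshift : (spIdx t).map (· + 1) ++ [(t.length : Int) + 1]
          = ((spIdx t) ++ [(t.length : Int)]).map (· + 1) := by simp
      subst h
      simp only [spIdx, if_pos, List.cons_append, List.length_cons]
      push_cast
      simp only [List.nil_append]
      show pairsMap ("" :: t) (-1 :: 0 :: ((spIdx t).map (· + 1) ++ [(t.length : Int) + 1]))
          = (gsp ("" :: t)).map (List.drop 1)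
      rw [hshift]
      simp only [pairsMap]
      rw [show (0 : Int) = (-1 : Int) + 1 by ring,
        pairsMap_shift "" t (spIdx t ++ [(t.length : Int)]) (-1) (by omega)
          (by intro a ha; simp at ha; rcases ha with ha | rfl
              · exact spIdx_nonneg t a ha
              · positivity)]
      have hfst : PySem.List.slice ("" :: t) (some (-1 + 2)) (some (-1 + 1)) = [] := by
        rw [PySem.List.slice_toNat _ (by omega) (by omega)]
        norm_num
      simp only [List.cons_append] at ih
      rw [hfst, ih]
      simp [gsp]
    · -- split_points = -1 :: (shifted); first slice is notes[1:q+1] = t[0:q] = first group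
      cases hc : spIdx t ++ [(t.length : Int)] with
      | nil => simp at hc
      | cons q rest =>
        have hq : 0 ≤ q := by
          cases hs : spIdx t with
          | nil => simp [hs] at hc; omega
          | cons a l =>
            have := spIdx_nonneg t a (by simp [hs])
            simp [hs] at hc; omega
        have hrest : ∀ a ∈ rest, 0 ≤ a := by
          intro a ha
          have : a ∈ spIdx t ++ [(t.length : Int)] := by simp [hc, ha]
          simp at this
          rcases this with h' | rfl
          · exact spIdx_nonneg t a h'
          · positivity
        have hshift : spIdx (x :: t) ++ [((x :: t).length : Int)]
            = (q + 1) :: rest.map (· + 1) := by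
          simp only [spIdx, h, List.length_cons]
          push_cast
          simp only [List.nil_append]
          rw [show ((spIdx t).map (· + 1)) ++ [(t.length : Int) + 1]
                = (spIdx t ++ [(t.length : Int)]).map (· + 1) by simp]
          simp [hc]
        simp only [List.cons_append] at hshift ⊢
        rw [show ((-1 : Int) :: (spIdx (x :: t) ++ [((x :: t).length : Int)]))
              = (-1 : Int) :: ((q + 1) :: rest.map (· + 1)) by rw [hshift]]
        simp only [pairsMap]
        rw [show (-1 : Int) + 2 = 0 + 1 by ring, slice_cons_succ x t 0 q le_rfl hq]
        rw [pairsMap_shift x t rest q (by omega) hrest]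
        have hfirst : PySem.List.slice t (some 0) (some q) = (gsp t).headI := by
          have := slice_first_group t
          rwa [hc] at this
        have ihc : PySem.List.slice t (some ((-1) + 2)) (some q) :: pairsMap t (q :: rest)
            = (gsp t).map (List.drop 1) := by
          have := ih
          simp only [List.cons_append, hc, pairsMap] at this
          exact this
        have htail : pairsMap t (q :: rest) = ((gsp t).map (List.drop 1)).tail := by
          rw [← ihc]; rfl
        rw [hfirst, htail, map_drop1_gsp]
        simp [gsp, h]

-- A equals the drop-1 of the groups
theorem fmt_A_eq (notes : List String) :
    fmt_puzzle_input notes = (gsp notes).map (List.drop 1) := by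
  show (PySem.List.pyRange 0 _ 1).map _ = _
  rw [enum_filter_eq_spIdx notes 0]
  have hsp : (spIdx notes).map (· + 0) = spIdx notes := by simp
  rw [hsp]
  have hlen : ((((((-1 : Int) :: spIdx notes ++ [(notes.length : Int)]).length : Int)) - 1) - 0).toNat
      = ((-1 : Int) :: spIdx notes ++ [(notes.length : Int)]).length - 1 := by
    simp
  rw [PySem.List.pyRange_one, List.map_map, ← pairsMap_full notes,
    ← range_pairs_eq_pairsMap notes ((-1 : Int) :: spIdx notes ++ [(notes.length : Int)]), ← hlen]
  apply List.map_congr_left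
  intro k hk
  simp only [Function.comp_apply, zero_add]
  have h2 : ((k : Int) + 1) = ((k + 1 : Nat) : Int) := by push_cast; ring
  rw [h2, PySem.List.pyGetD_natCast, PySem.List.pyGetD_natCast]

-- B equals the drop-1 of the groups (loop invariant)
theorem fmtAltGo_eq (xs : List String) :
    ∀ (cur : List String) (res : List (List String)),
      fmtAltGo xs cur res
        = res ++ ((cur ++ (gsp xs).headI).drop 1) :: ((gsp xs).tail.map (List.drop 1)) := by
  induction xs with
  | nil => intro cur res; simp [fmtAltGo, gsp]
  | cons x t ih =>
    intro cur res
    by_cases h : x = ""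
    · rw [show fmtAltGo (x :: t) cur res = fmtAltGo t [] (res ++ [cur.drop 1]) by
        simp [fmtAltGo, h]]
      rw [ih [] (res ++ [cur.drop 1])]
      rw [show gsp (x :: t) = [] :: gsp t by simp [gsp, h]]
      rw [List.tail_cons, map_drop1_gsp t]
      simp
    · rw [show fmtAltGo (x :: t) cur res = fmtAltGo t (cur ++ [x]) res by
        simp [fmtAltGo, h]]
      rw [ih (cur ++ [x]) res]
      rw [show gsp (x :: t) = (x :: (gsp t).headI) :: (gsp t).tail by simp [gsp, h]]
      simp

theorem fmt_B_eq (notes : List String) :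
    fmt_puzzle_input_alt notes = (gsp notes).map (List.drop 1) := by
  unfold fmt_puzzle_input_alt
  rw [fmtAltGo_eq notes [] [], map_drop1_gsp]
  simp

-- ===== VERDICT (by name: the statement is the Claim_ definition above) =====
theorem fmt_puzzle_input_spec : Claim_equal_fmt_puzzle_input := by
  intro notes _
  unfold Spec_fmt_puzzle_input
  rw [fmt_A_eq, fmt_B_eq]
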